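-- pv_equiv track=rewrite | github.com/Kabeer-NT/Hangman | main.py | num_unique_chars
-- ===== SOURCE A (Python) =====
-- def num_unique_chars(string_x):
--     unique = []
--     count = 0
--     for i in range(len(string_x)):
--         if string_x[i] not in unique and string_x[i] != " ":
--             unique.append(string_x[i])
--             count += 1
--     return count
-- ===== SOURCE B (Python) =====
-- def num_unique_chars(string_x):
--     # sort-then-adjacent-scan distinct count (spaces collapse like any char but are never counted)
--     count = 0
--     prev = None
--     for c in sorted(string_x):
--         if c == prev:
--             continue
--         prev = c
--         if c != " ":
--             count += 1
--     return count
-- ===== Notes on version B (the rewrite author's own statement) =====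
-- stated objective: alternative
-- what changed: Replaced the seen-list membership accumulator with a sort-then-adjacent-scan distinct count maintaining only the previous character and a counter.
import Mathlib
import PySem

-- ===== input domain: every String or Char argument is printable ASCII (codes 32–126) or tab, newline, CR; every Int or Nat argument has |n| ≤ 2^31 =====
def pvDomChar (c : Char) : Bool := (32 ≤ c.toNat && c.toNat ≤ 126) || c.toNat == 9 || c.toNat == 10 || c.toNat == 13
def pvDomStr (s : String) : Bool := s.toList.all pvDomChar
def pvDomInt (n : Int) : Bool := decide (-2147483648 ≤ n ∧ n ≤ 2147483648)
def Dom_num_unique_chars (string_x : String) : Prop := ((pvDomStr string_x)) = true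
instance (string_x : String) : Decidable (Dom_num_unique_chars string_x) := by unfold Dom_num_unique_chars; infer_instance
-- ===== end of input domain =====

-- B replaces A's seen-list membership accumulator with a sort-then-adjacent-scan distinct count (alternative decomposition; return value only, no mutation involved).

-- ===== PORT A =====
-- A: scan by index, keep the list of characters seen so far, count a character
-- when it is not yet in the list and is not a space.
def num_unique_chars (string_x : String) : Int :=
  let cs := string_x.toList
  let r := (PySem.List.pyRange 0 (PySem.Str.len string_x) 1).foldl
    (fun (st : List Char × Int) i =>
      let c := PySem.List.pyGetD cs i ' '   -- i is always in range here, so this is exact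
      if c ∉ st.1 ∧ c ≠ ' ' then (st.1 ++ [c], st.2 + 1) else st)
    ([], 0)
  r.2

-- ===== PORT B =====
-- B: sort the characters, then one adjacent scan with prev/count.
def num_unique_chars_alt (string_x : String) : Int :=
  let r := (PySem.List.sorted string_x.toList (fun c => c) false).foldl
    (fun (st : Option Char × Int) c =>
      if some c = st.1 then st
      else (some c, if c ≠ ' ' then st.2 + 1 else st.2))
    (none, 0)
  r.2

-- ===== PRECONDITION & SPEC =====
def Spec_num_unique_chars (string_x : String) (out : Int) : Prop := out = num_unique_chars_alt string_x
instance (string_x : String) (out : Int) : Decidable (Spec_num_unique_chars string_x out) := by unfold Spec_num_unique_chars; infer_instance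

-- ===== CLAIM (what is proved, stated in full; the proofs are below) =====
def Claim_equal_num_unique_chars : Prop := ∀ (string_x : String), Dom_num_unique_chars string_x → Spec_num_unique_chars string_x (num_unique_chars string_x)

-- ===== LEMMAS AND PROOFS =====

-- inserting x counts one more than the same set with x erased (whether or not x was present)
theorem card_insert_erase (s : Finset Char) (x : Char) :
    (insert x s).card = (s.erase x).card + 1 := by
  by_cases hx : x ∈ s
  · rw [Finset.insert_eq_self.mpr hx, Finset.card_erase_of_mem hx]
    have : 0 < s.card := Finset.card_pos.mpr ⟨x, hx⟩
    omega
  · rw [Finset.card_insert_of_notMem hx, Finset.erase_eq_of_notMem hx]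

-- A's loop: the count accumulates the distinct non-space characters not yet seen.
theorem foldA_card (l : List Char) : ∀ (u : List Char) (c : Int),
    (l.foldl (fun (st : List Char × Int) x =>
        if x ∉ st.1 ∧ x ≠ ' ' then (st.1 ++ [x], st.2 + 1) else st) (u, c)).2
      = c + (((l.toFinset.erase ' ') \ u.toFinset).card : Int) := by
  induction l with
  | nil => intro u c; simp
  | cons x t ih =>
    intro u c
    by_cases hx : x ∉ u ∧ x ≠ ' '
    · simp only [List.foldl_cons, if_pos hx, ih]
      have h1 : ((x :: t).toFinset.erase ' ') \ u.toFinset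
          = insert x ((t.toFinset.erase ' ') \ u.toFinset) := by
        ext y
        by_cases hyx : y = x
        · subst hyx; simp [hx.1, hx.2]
        · simp [hyx]
      have h2 : (t.toFinset.erase ' ') \ (u ++ [x]).toFinset
          = ((t.toFinset.erase ' ') \ u.toFinset).erase x := by
        ext y
        by_cases hyx : y = x
        · subst hyx; simp
        · simp [hyx]
      rw [h1, h2, card_insert_erase]
      push_cast
      ring
    · simp only [List.foldl_cons, if_neg hx, ih]
      have hx' : x ∈ u ∨ x = ' ' := by tauto
      have hset : ((x :: t).toFinset.erase ' ') \ u.toFinset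
          = (t.toFinset.erase ' ') \ u.toFinset := by
        ext y
        by_cases hyx : y = x
        · subst hyx
          rcases hx' with hmem | hsp
          · simp [hmem]
          · simp [hsp]
        · simp [hyx]
      rw [hset]

-- B's loop on a sorted tail: counts the distinct non-space characters, excluding
-- prev (which is a lower bound of the tail).
def pvOptErase (p : Option Char) (s : Finset Char) : Finset Char :=
  match p with
  | none => s
  | some q => s.erase q

theorem foldB_card (l : List Char) : ∀ (p : Option Char) (c : Int),
    l.Pairwise (· ≤ ·) →
    (∀ q, p = some q → ∀ x ∈ l, q ≤ x) →
    (l.foldl (fun (st : Option Char × Int) x =>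
        if some x = st.1 then st
        else (some x, if x ≠ ' ' then st.2 + 1 else st.2)) (p, c)).2
      = c + ((pvOptErase p (l.toFinset.erase ' ')).card : Int) := by
  induction l with
  | nil => intro p c _ _; cases p <;> simp [pvOptErase]
  | cons x t ih =>
    intro p c hpw hlb
    have hpw' : t.Pairwise (· ≤ ·) := hpw.of_cons
    have hxle : ∀ y ∈ t, x ≤ y := (List.pairwise_cons.mp hpw).1
    have hlb' : ∀ q, (some x : Option Char) = some q → ∀ y ∈ t, q ≤ y := by
      intro q hq y hy
      exact (Option.some.inj hq) ▸ hxle y hy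
    by_cases hpx : some x = p
    · -- x equals prev: skipped, and x contributes nothing new
      subst hpx
      rw [List.foldl_cons, if_pos rfl, ih (some x) c hpw' hlb']
      simp only [pvOptErase]
      have hset : (t.toFinset.erase ' ').erase x = ((x :: t).toFinset.erase ' ').erase x := by
        rw [List.toFinset_cons]
        by_cases hsp : x = ' '
        · subst hsp; simp
        · rw [Finset.erase_insert_of_ne hsp, Finset.erase_insert_eq_erase]
      rw [hset]
    · -- a character different from prev
      simp only [List.foldl_cons, if_neg hpx]
      rw [ih (some x) _ hpw' hlb']
      -- prev (if some q) is strictly below every element of x :: t, so erasing it is a no-op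
      have hpe : pvOptErase p ((x :: t).toFinset.erase ' ')
             = (x :: t).toFinset.erase ' ' := by
        cases p with
        | none => rfl
        | some q =>
          have hql : ∀ y ∈ x :: t, q ≤ y := hlb q rfl
          have hqx : q ≠ x := fun h => hpx (by rw [h])
          have hqm : q ∉ (x :: t).toFinset := by
            simp only [List.mem_toFinset]
            intro hq
            rcases List.mem_cons.mp hq with rfl | hqt
            · exact hqx rfl
            · exact hqx (le_antisymm (hql x List.mem_cons_self) (hxle q hqt))
          exact Finset.erase_eq_of_notMem (fun h => hqm (Finset.mem_of_mem_erase h))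
      rw [hpe]
      simp only [pvOptErase]
      by_cases hsp : x = ' '
      · subst hsp
        simp only [ne_eq, not_true_eq_false, if_false]
        congr 2
        rw [List.toFinset_cons, Finset.erase_insert_eq_erase, Finset.erase_idem]
      · rw [if_pos hsp]
        have h1 : (x :: t).toFinset.erase ' ' = insert x (t.toFinset.erase ' ') := by
          rw [List.toFinset_cons, Finset.erase_insert_of_ne hsp]
        rw [h1, card_insert_erase]
        push_cast
        ring

-- ===== VERDICT (by name: the statement is the Claim_ definition above) =====
theorem num_unique_chars_spec : Claim_equal_num_unique_chars := by
  intro s _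
  unfold Spec_num_unique_chars num_unique_chars num_unique_chars_alt
  simp only [PySem.Str.len_eq]
  rw [PySem.List.foldl_pyRange_zero_pyGetD' s.toList ' '
        (fun (st : List Char × Int) c =>
          if c ∉ st.1 ∧ c ≠ ' ' then (st.1 ++ [c], st.2 + 1) else st) ([], 0)]
  rw [foldA_card s.toList [] 0,
      foldB_card (PySem.List.sorted s.toList (fun c => c) false) none 0
        (PySem.List.sorted_pairwise s.toList _) (by intro q hq; cases hq)]
  simp [pvOptErase, List.toFinset_eq_of_perm _ _ (PySem.List.sorted_perm s.toList (fun c => c) false)]
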